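-- pv_equiv track=rewrite | github.com/wnlowe/metadataApp | ixml.py | _format_xml
-- ===== SOURCE A (Python) =====
-- def _format_xml(xml_str: str) -> str:
--     """Format XML with proper indentation"""
--     # Simple formatting - add newlines and indentation
--     formatted = xml_str.replace('><', '>\n<')
--     lines = formatted.split('\n')
--     indented_lines = []
--     indent_level = 0
--
--     for line in lines:
--         line = line.strip()
--         if line.startswith('</'):
--             indent_level -= 1
--
--         indented_lines.append('  ' * indent_level + line)
--
--         if line.startswith('<') and not line.startswith('</') and not line.endswith('/>') and not '>' in line[1:]:
--             indent_level += 1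
--         elif line.startswith('<') and not line.startswith('</') and not line.endswith('/>'):
--             # Opening tag with content
--             pass
--
--     return '\n'.join(indented_lines)
-- ===== SOURCE B (Python) =====
-- def _dec(ln):
--     return 1 if ln.startswith('</') else 0
--
--
-- def _inc(ln):
--     return 1 if (ln.startswith('<') and not ln.startswith('</')
--                  and not ln.endswith('/>') and '>' not in ln[1:]) else 0
--
--
-- def _format_xml(xml_str: str) -> str:
--     """Format XML with proper indentation (delta + prefix-sum decomposition)."""
--     lines = [ln.strip() for ln in xml_str.replace('><', '>\n<').split('\n')]
--     decs = [_dec(ln) for ln in lines]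
--     incs = [_inc(ln) for ln in lines]
--     prefix = [0]
--     run = 0
--     for d, i in zip(decs, incs):
--         run += i - d
--         prefix.append(run)
--     return '\n'.join('  ' * (p - d) + ln
--                      for ln, d, p in zip(lines, decs, prefix))
-- ===== Notes on version B (the rewrite author's own statement) =====
-- stated objective: alternative
-- what changed: Replaces A's single stateful loop (mutating an indent counter while appending) with a multi-pass pipeline: strip all lines, map each line to separate dec/inc deltas, build a prefix-sum list of levels, then render each line from its precomputed level (prefix[k]-dec[k]) with a zip/join.
import Mathlib
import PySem

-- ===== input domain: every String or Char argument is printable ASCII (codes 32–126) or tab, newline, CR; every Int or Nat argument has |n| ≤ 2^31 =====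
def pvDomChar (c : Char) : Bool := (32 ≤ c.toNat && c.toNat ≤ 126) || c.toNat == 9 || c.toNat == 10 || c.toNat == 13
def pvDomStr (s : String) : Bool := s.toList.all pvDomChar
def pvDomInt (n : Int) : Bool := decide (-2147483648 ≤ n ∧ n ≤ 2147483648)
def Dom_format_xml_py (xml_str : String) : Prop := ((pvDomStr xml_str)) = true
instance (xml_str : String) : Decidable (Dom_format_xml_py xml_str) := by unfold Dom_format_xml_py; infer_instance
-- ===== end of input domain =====

-- B (and its port) reorganises A's single stateful loop into a multi-pass pipeline:
-- strip, map to dec/inc deltas, prefix-sum the levels, render with zip/join. Same value everywhere.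

-- ===== PORT A =====
-- one loop iteration of A, on the already-stripped line (the port strips inside the fold, as A does)
def pvStep (st : List String × Int) (line : String) : List String × Int :=
  let lvl1 := if PySem.Str.startswith line "</" then st.2 - 1 else st.2
  let acc := st.1 ++ [String.ofList (PySem.List.pyRepeat "  ".toList lvl1 ++ line.toList)]
  let lvl2 := if (PySem.Str.startswith line "<" && !(PySem.Str.startswith line "</")
        && !(PySem.Str.endswith line "/>")
        && !(PySem.Str.isIn ">" (PySem.Str.slice line (some 1) none)))
      then lvl1 + 1 else lvl1
  (acc, lvl2)

def format_xml_py (xml_str : String) : String :=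
  let formatted := PySem.Str.replace xml_str "><" ">\n<"
  let lines := (PySem.Str.split? formatted "\n").getD []
  let st := lines.foldl (fun st raw => pvStep st (PySem.Str.strip raw)) ([], 0)
  PySem.Str.join "\n" st.1

-- ===== PORT B =====
def pvDec (ln : String) : Int := if PySem.Str.startswith ln "</" then 1 else 0

def pvInc (ln : String) : Int :=
  if (PySem.Str.startswith ln "<" && !(PySem.Str.startswith ln "</")
      && !(PySem.Str.endswith ln "/>")
      && !(PySem.Str.isIn ">" (PySem.Str.slice ln (some 1) none)))
  then 1 else 0

def format_xml_py_alt (xml_str : String) : String :=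
  let lines := ((PySem.Str.split? (PySem.Str.replace xml_str "><" ">\n<") "\n").getD []).map PySem.Str.strip
  let decs := lines.map pvDec
  let incs := lines.map pvInc
  let pr := (decs.zip incs).foldl
      (fun (s : List Int × Int) di => (s.1 ++ [s.2 + di.2 - di.1], s.2 + di.2 - di.1)) ([(0 : Int)], 0)
  PySem.Str.join "\n"
    ((lines.zip (decs.zip pr.1)).map
      (fun t => String.ofList (PySem.List.pyRepeat "  ".toList (t.2.2 - t.2.1) ++ t.1.toList)))

-- ===== PRECONDITION & SPEC =====
def Spec_format_xml_py (xml_str : String) (out : String) : Prop := out = format_xml_py_alt xml_str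
instance (xml_str : String) (out : String) : Decidable (Spec_format_xml_py xml_str out) := by unfold Spec_format_xml_py; infer_instance

-- ===== CLAIM (what is proved, stated in full; the proofs are below) =====
def Claim_equal_format_xml_py : Prop := ∀ (xml_str : String), Dom_format_xml_py xml_str → Spec_format_xml_py xml_str (format_xml_py xml_str)

-- ===== LEMMAS AND PROOFS =====

-- the rendered line at level v (A emits it at level v - dec)
def pvLine (l : String) (v : Int) : String :=
  String.ofList (PySem.List.pyRepeat "  ".toList (v - pvDec l) ++ l.toList)

-- common specification of the emitted lines, starting at level v
def renderA : List String → Int → List String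
  | [], _ => []
  | l :: ls, v => pvLine l v :: renderA ls (v - pvDec l + pvInc l)

lemma pvStep_eq (st : List String × Int) (l : String) :
    pvStep st l = (st.1 ++ [pvLine l st.2], st.2 - pvDec l + pvInc l) := by
  unfold pvStep pvLine pvDec pvInc
  split_ifs with h1 h2 h3 <;> simp_all

lemma foldA_eq (ls : List String) (acc : List String) (v : Int) :
    (ls.foldl pvStep (acc, v)).1 = acc ++ renderA ls v := by
  induction ls generalizing acc v with
  | nil => simp [renderA]
  | cons l t ih =>
    simp only [List.foldl_cons, pvStep_eq, renderA]
    rw [ih]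
    simp

-- the prefix-sum fold of B, characterised
def pvSums : List (Int × Int) → Int → List Int
  | [], _ => []
  | di :: t, r => (r + di.2 - di.1) :: pvSums t (r + di.2 - di.1)

lemma foldP_eq (P : List (Int × Int)) (ps0 : List Int) (r : Int) :
    (P.foldl (fun (s : List Int × Int) di => (s.1 ++ [s.2 + di.2 - di.1], s.2 + di.2 - di.1))
        (ps0, r)).1 = ps0 ++ pvSums P r := by
  induction P generalizing ps0 r with
  | nil => simp [pvSums]
  | cons di t ih =>
    simp only [List.foldl_cons, pvSums]
    rw [ih]
    simp

lemma zipmap_eq (ls : List String) (r : Int) :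
    ((ls.zip ((ls.map pvDec).zip (r :: pvSums ((ls.map pvDec).zip (ls.map pvInc)) r))).map
      (fun t => String.ofList (PySem.List.pyRepeat "  ".toList (t.2.2 - t.2.1) ++ t.1.toList)))
    = renderA ls r := by
  induction ls generalizing r with
  | nil => simp [renderA]
  | cons l t ih =>
    simp only [List.map_cons, List.zip_cons_cons, pvSums, renderA, pvLine]
    refine congrArg₂ _ rfl ?_
    rw [show r + pvInc l - pvDec l = r - pvDec l + pvInc l by omega] at *
    exact ih (r - pvDec l + pvInc l)

-- ===== VERDICT (by name: the statement is the Claim_ definition above) =====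
theorem format_xml_py_spec : Claim_equal_format_xml_py := by
  intro xml_str _
  unfold Spec_format_xml_py format_xml_py format_xml_py_alt
  simp only [foldP_eq]
  rw [← List.foldl_map (f := PySem.Str.strip) (g := pvStep), foldA_eq]
  simp only [List.nil_append, List.singleton_append, zipmap_eq]
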